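-- pv_equiv track=rewrite | github.com/vjain1999/rx-media-manager | run_full_system_extract.py | add_review_flags
-- ===== SOURCE A (Python) =====
-- from typing import List, Dict, Union, Optional
--
-- def add_review_flags(results: List[Dict]) -> List[Dict]:
--     """Add 'review' flag when the same business_id has multiple distinct non-empty handles."""
--     by_biz: Dict[str, set] = {}
--     for r in results:
--         bid = (r.get('business_id') or '').strip()
--         handle = (r.get('instagram_handle') or '').strip().lower()
--         if bid:
--             if bid not in by_biz:
--                 by_biz[bid] = set()
--             if handle:
--                 by_biz[bid].add(handle)
--
--     flagged = {bid for bid, handles in by_biz.items() if len(handles) > 1}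
--     for r in results:
--         bid = (r.get('business_id') or '').strip()
--         r['review'] = 'FLAG' if bid in flagged else ''
--     return results
-- ===== SOURCE B (Python) =====
-- from typing import List, Dict
--
--
-- def _has_conflict(bid, norm):
--     """True iff norm contains two distinct non-empty handles for this business id."""
--     first = None
--     for b, h in norm:
--         if b != bid or not h:
--             continue
--         if first is None:
--             first = h
--         elif h != first:
--             return True
--     return False
--
--
-- def add_review_flags(results: List[Dict]) -> List[Dict]:
--     """Brute-force rescan: normalize once, then decide each row's flag by scanning the
--     normalized rows for a second distinct non-empty handle (no per-business grouping)."""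
--     norm = [((r.get('business_id') or '').strip(),
--              (r.get('instagram_handle') or '').strip().lower()) for r in results]
--     for r, (bid, _h) in zip(results, norm):
--         r['review'] = 'FLAG' if bid and _has_conflict(bid, norm) else ''
--     return results
-- ===== Notes on version B (the rewrite author's own statement) =====
-- stated objective: alternative
-- what changed: A groups rows into a dict of per-business handle sets and flags ids whose set has size > 1; B builds no grouping at all: it normalizes the rows once and decides each row's flag by a direct rescan of the normalized rows looking for a non-empty handle differing from the first one seen for that business id.
import Mathlib
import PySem

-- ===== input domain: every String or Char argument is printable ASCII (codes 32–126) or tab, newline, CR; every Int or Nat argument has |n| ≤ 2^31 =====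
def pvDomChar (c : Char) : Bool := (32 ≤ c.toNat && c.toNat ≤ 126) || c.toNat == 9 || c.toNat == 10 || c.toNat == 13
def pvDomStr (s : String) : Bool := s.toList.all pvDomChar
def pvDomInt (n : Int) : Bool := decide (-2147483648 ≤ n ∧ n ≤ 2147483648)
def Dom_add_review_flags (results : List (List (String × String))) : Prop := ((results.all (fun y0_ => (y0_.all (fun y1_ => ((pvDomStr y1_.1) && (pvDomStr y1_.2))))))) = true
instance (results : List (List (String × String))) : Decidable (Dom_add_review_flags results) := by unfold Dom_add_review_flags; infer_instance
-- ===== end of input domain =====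

-- B replaces A's dict-of-handle-sets grouping by a per-row rescan of the normalized rows
-- (no grouping structure at all); both Pythons mutate the rows in place, the theorem is
-- about the returned value.

-- ===== PORT A =====
def pvRowGet? (r : List (String × String)) (k : String) : Option String :=
  match r with
  | [] => none
  | (k', v) :: rest => if k' = k then some v else pvRowGet? rest k

def pvRowSet (r : List (String × String)) (k v : String) : List (String × String) :=
  match r with
  | [] => [(k, v)]
  | (k', v') :: rest => if k' = k then (k, v) :: rest else (k', v') :: pvRowSet rest k v

-- bid = (r.get('business_id') or '').strip()
def pvBid (r : List (String × String)) : String :=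
  PySem.Str.strip ((pvRowGet? r "business_id").getD "")

-- handle = (r.get('instagram_handle') or '').strip().lower()
def pvHandle (r : List (String × String)) : String :=
  PySem.Str.lower (PySem.Str.strip ((pvRowGet? r "instagram_handle").getD ""))

-- body of A's first loop: ensure by_biz[bid] exists, add the non-empty handle to its set
def pvStepA (d : PySem.Dict String (PySem.Set String)) (r : List (String × String)) :
    PySem.Dict String (PySem.Set String) :=
  let bid := pvBid r
  let handle := pvHandle r
  if bid ≠ "" then
    let d := if d.contains bid then d else d.insert bid PySem.Set.empty
    if handle ≠ "" then d.modify bid PySem.Set.empty (fun s => PySem.Set.add s handle)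
    else d
  else d

def add_review_flags (results : List (List (String × String))) : List (List (String × String)) :=
  let by_biz : PySem.Dict String (PySem.Set String) := results.foldl pvStepA PySem.Dict.empty
  let flagged : PySem.Set String :=
    by_biz.items.foldl (fun f p => if 1 < PySem.Set.len p.2 then PySem.Set.add f p.1 else f)
      PySem.Set.empty
  results.map (fun r =>
    pvRowSet r "review" (if PySem.Set.contains flagged (pvBid r) then "FLAG" else ""))

-- ===== PORT B =====
-- _has_conflict(bid, norm): scan for a non-empty handle differing from the first one seen
def pvScan (bid : String) : List (String × String) → Option String → Bool
  | [], _ => false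
  | p :: rest, first =>
    if p.1 ≠ bid ∨ p.2 = "" then pvScan bid rest first
    else
      match first with
      | none => pvScan bid rest (some p.2)
      | some f => if p.2 = f then pvScan bid rest (some f) else true

def add_review_flags_alt (results : List (List (String × String))) : List (List (String × String)) :=
  let norm : List (String × String) := results.map (fun r => (pvBid r, pvHandle r))
  (results.zip norm).map (fun p =>
    pvRowSet p.1 "review"
      (if p.2.1 ≠ "" ∧ pvScan p.2.1 norm none = true then "FLAG" else ""))

-- ===== PRECONDITION & SPEC =====
def Spec_add_review_flags (results : List (List (String × String))) (out : List (List (String × String))) : Prop := out = add_review_flags_alt results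
instance (results : List (List (String × String))) (out : List (List (String × String))) : Decidable (Spec_add_review_flags results out) := by unfold Spec_add_review_flags; infer_instance

-- ===== CLAIM (what is proved, stated in full; the proofs are below) =====
def Claim_equal_add_review_flags : Prop := ∀ (results : List (List (String × String))), Dom_add_review_flags results → Spec_add_review_flags results (add_review_flags results)

-- ===== LEMMAS AND PROOFS =====

-- the non-empty handles recorded for business id `x` among the normalized rows
def pvHs (x : String) (norm : List (String × String)) : List String :=
  norm.filterMap (fun p => if p.1 = x ∧ p.2 ≠ "" then some p.2 else none)

theorem pvStepA_getD (d : PySem.Dict String (PySem.Set String)) (r : List (String × String))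
    (x : String) (hx : x ≠ "") :
    (pvStepA d r).getD x [] =
      if pvBid r = x ∧ pvHandle r ≠ "" then PySem.Set.add (d.getD x []) (pvHandle r)
      else d.getD x [] := by
  unfold pvStepA
  by_cases hb : pvBid r = ""
  · rw [if_neg (by simp [hb]), if_neg (by rintro ⟨rfl, -⟩; exact hx hb)]
  · simp only [ne_eq, hb, not_false_eq_true, if_true, PySem.Set.empty]
    have hd1 : (if d.contains (pvBid r) = true then d else d.insert (pvBid r) ([] : PySem.Set String)).getD x [] = d.getD x [] := by
      split
      · rfl
      · rename_i hc
        rw [PySem.Dict.getD_insert]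
        split
        · rename_i hxe; subst hxe
          exact (PySem.Dict.getD_of_not_contains d [] (by simpa using hc)).symm
        · rfl
    by_cases hh : pvHandle r = ""
    · simp only [hh, not_true_eq_false, if_false, and_false]
      exact hd1
    · simp only [hh, not_false_eq_true, if_true, and_true]
      rw [PySem.Dict.getD_modify]
      by_cases hxb : pvBid r = x
      · subst hxb
        rw [if_pos rfl, if_pos rfl, hd1]
      · rw [if_neg (fun h => hxb h.symm), if_neg hxb]
        exact hd1

theorem pvFoldA_getD (rs : List (List (String × String)))
    (d : PySem.Dict String (PySem.Set String)) (x : String) (hx : x ≠ "") :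
    (rs.foldl pvStepA d).getD x [] =
      (pvHs x (rs.map (fun r => (pvBid r, pvHandle r)))).foldl PySem.Set.add (d.getD x []) := by
  induction rs generalizing d with
  | nil => rfl
  | cons r rs ih =>
    rw [List.foldl_cons, ih, List.map_cons]
    unfold pvHs
    rw [List.filterMap_cons]
    by_cases hc : pvBid r = x ∧ pvHandle r ≠ ""
    · rw [if_pos hc, List.foldl_cons, pvStepA_getD d r x hx, if_pos hc]
    · rw [if_neg hc, pvStepA_getD d r x hx, if_neg hc]

theorem pvStepA_contains_empty (d : PySem.Dict String (PySem.Set String))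
    (r : List (String × String)) : (pvStepA d r).contains "" = d.contains "" := by
  have hbe : ∀ s : String, s ≠ "" → ("" == s) = false := by
    intro s hs
    exact beq_eq_false_iff_ne.mpr (fun e => hs e.symm)
  unfold pvStepA
  by_cases hb : pvBid r = ""
  · rw [if_neg (by simp [hb])]
  · simp only [ne_eq, hb, not_false_eq_true, if_true]
    have hd1 : (if d.contains (pvBid r) = true then d else d.insert (pvBid r) PySem.Set.empty).contains "" = d.contains "" := by
      split
      · rfl
      · rw [PySem.Dict.contains_insert, hbe _ hb, Bool.false_or]
    split
    · rw [PySem.Dict.contains_modify, hbe _ hb, Bool.false_or, hd1]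
    · exact hd1

theorem pvFoldA_contains_empty (rs : List (List (String × String)))
    (d : PySem.Dict String (PySem.Set String)) :
    (rs.foldl pvStepA d).contains "" = d.contains "" := by
  induction rs generalizing d with
  | nil => rfl
  | cons r rs ih => rw [List.foldl_cons, ih, pvStepA_contains_empty]

theorem pvStepA_nodup (d : PySem.Dict String (PySem.Set String)) (r : List (String × String))
    (h : d.keys.Nodup) : (pvStepA d r).keys.Nodup := by
  unfold pvStepA
  have hd1 : (if d.contains (pvBid r) = true then d else d.insert (pvBid r) PySem.Set.empty).keys.Nodup := by
    split
    · exact h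
    · exact PySem.Dict.nodup_keys_insert d _ _ h
  by_cases hb : pvBid r = ""
  · rw [if_neg (by simp [hb])]
    exact h
  · simp only [ne_eq, hb, not_false_eq_true, if_true]
    by_cases hh : pvHandle r = ""
    · rw [if_neg (by simp [hh])]
      exact hd1
    · rw [if_pos (by simp [hh]), PySem.Dict.keys_modify]
      exact PySem.Dict.nodup_keys_insert _ _ _ hd1

theorem pvFoldA_nodup (rs : List (List (String × String)))
    (d : PySem.Dict String (PySem.Set String)) (h : d.keys.Nodup) :
    (rs.foldl pvStepA d).keys.Nodup := by
  induction rs generalizing d with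
  | nil => exact h
  | cons r rs ih => exact ih _ (pvStepA_nodup d r h)

-- membership in A's flagged set, computed from the items fold
theorem pvFlag_fold_mem (l : List (String × PySem.Set String)) (f0 : PySem.Set String) (x : String) :
    x ∈ l.foldl (fun f p => if 1 < PySem.Set.len p.2 then PySem.Set.add f p.1 else f) f0 ↔
      x ∈ f0 ∨ ∃ p ∈ l, p.1 = x ∧ 1 < p.2.length := by
  induction l generalizing f0 with
  | nil => simp
  | cons p l ih =>
    rw [List.foldl_cons, ih]
    have hlen : (1 < PySem.Set.len p.2) ↔ 1 < p.2.length := by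
      simp [PySem.Set.len]
    constructor
    · rintro (hm | ⟨q, hq, h1, h2⟩)
      · by_cases hp : 1 < PySem.Set.len p.2
        · rw [if_pos hp, PySem.Set.mem_add] at hm
          rcases hm with hm | rfl
          · exact Or.inl hm
          · exact Or.inr ⟨p, List.mem_cons_self, rfl, hlen.mp hp⟩
        · rw [if_neg hp] at hm
          exact Or.inl hm
      · exact Or.inr ⟨q, List.mem_cons_of_mem p hq, h1, h2⟩
    · rintro (hm | ⟨q, hq, h1, h2⟩)
      · left
        split
        · exact (PySem.Set.mem_add f0 p.1 x).mpr (Or.inl hm)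
        · exact hm
      · rcases List.mem_cons.mp hq with rfl | hq
        · left
          rw [if_pos (hlen.mpr h2), PySem.Set.mem_add]
          exact Or.inr h1.symm
        · exact Or.inr ⟨q, hq, h1, h2⟩

-- x is flagged by A  ↔  x is a key and its handle set has more than one element
theorem pvFlag_mem (results : List (List (String × String))) (x : String) :
    (x ∈ (results.foldl pvStepA PySem.Dict.empty).items.foldl
        (fun f p => if 1 < PySem.Set.len p.2 then PySem.Set.add f p.1 else f) PySem.Set.empty) ↔
      x ∈ (results.foldl pvStepA PySem.Dict.empty).keys ∧
        1 < ((results.foldl pvStepA PySem.Dict.empty).getD x []).length := by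
  have hnd := pvFoldA_nodup results PySem.Dict.empty PySem.Dict.nodup_keys_empty
  rw [pvFlag_fold_mem]
  simp only [PySem.Set.empty, List.not_mem_nil, false_or]
  rw [PySem.Dict.items_eq_map_keys _ hnd ([] : PySem.Set String)]
  constructor
  · rintro ⟨p, hp, rfl, hlen⟩
    obtain ⟨k, hk, rfl⟩ := List.mem_map.mp hp
    exact ⟨hk, hlen⟩
  · rintro ⟨hk, hlen⟩
    exact ⟨(x, (results.foldl pvStepA PySem.Dict.empty).getD x []),
      List.mem_map.mpr ⟨x, hk, rfl⟩, rfl, hlen⟩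

-- a deduplicated list has more than one element iff some element differs from the head
theorem pvOfList_one_lt (l : List String) :
    1 < (PySem.Set.ofList l).length ↔
      match l with
      | [] => False
      | h :: t => ∃ y ∈ t, y ≠ h := by
  cases l with
  | nil => simp [PySem.Set.ofList]
  | cons h t =>
    rw [PySem.Set.ofList_cons]
    simp only [List.length_cons]
    have : 1 < (PySem.Set.discard (PySem.Set.ofList t) h).length + 1 ↔
        0 < (PySem.Set.discard (PySem.Set.ofList t) h).length := by omega
    rw [this, List.length_pos_iff_exists_mem]
    constructor
    · rintro ⟨y, hy⟩
      rw [PySem.Set.mem_discard] at hy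
      exact ⟨y, (PySem.Set.mem_ofList t y).mp hy.1, hy.2⟩
    · rintro ⟨y, hy, hne⟩
      exact ⟨y, (PySem.Set.mem_discard _ _ _).mpr ⟨(PySem.Set.mem_ofList t y).mpr hy, hne⟩⟩

-- B's scan, first already set: true iff some recorded handle differs from it
theorem pvScan_some (bid : String) (l : List (String × String)) (f : String) :
    pvScan bid l (some f) = true ↔ ∃ y ∈ pvHs bid l, y ≠ f := by
  induction l with
  | nil => simp [pvScan, pvHs]
  | cons p l ih =>
    unfold pvScan pvHs
    rw [List.filterMap_cons]
    by_cases hc : p.1 = bid ∧ p.2 ≠ ""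
    · rw [if_neg (by simp [hc.1, hc.2]), if_pos hc]
      dsimp only
      by_cases hf : p.2 = f
      · rw [if_pos hf, ih]
        subst hf
        simp only [List.mem_cons]
        constructor
        · rintro ⟨y, hy, hne⟩; exact ⟨y, Or.inr hy, hne⟩
        · rintro ⟨y, hy | hy, hne⟩
          · exact absurd hy hne
          · exact ⟨y, hy, hne⟩
      · rw [if_neg hf]
        exact iff_of_true rfl ⟨p.2, List.mem_cons_self, hf⟩
    · rw [if_pos (Or.imp id not_not.mp (not_and_or.mp hc)), if_neg hc]
      exact ih

-- B's scan from scratch: true iff some recorded handle differs from the first one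
theorem pvScan_none (bid : String) (l : List (String × String)) :
    pvScan bid l none = true ↔
      match pvHs bid l with
      | [] => False
      | h :: t => ∃ y ∈ t, y ≠ h := by
  induction l with
  | nil => simp [pvScan, pvHs]
  | cons p l ih =>
    unfold pvScan pvHs
    rw [List.filterMap_cons]
    by_cases hc : p.1 = bid ∧ p.2 ≠ ""
    · rw [if_neg (by simp [hc.1, hc.2]), if_pos hc]
      dsimp only
      exact pvScan_some bid l p.2
    · rw [if_pos (Or.imp id not_not.mp (not_and_or.mp hc)), if_neg hc]
      exact ih

theorem pvZip_map_self {α β : Type} (l : List α) (g : α → β) :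
    l.zip (l.map g) = l.map (fun a => (a, g a)) := by
  have h := @List.zip_map' α α β id g l
  simpa using h

-- the two flag conditions agree for every row
theorem pvCond_agree (results : List (List (String × String))) (r : List (String × String)) :
    (if PySem.Set.contains
          ((results.foldl pvStepA PySem.Dict.empty).items.foldl
            (fun f p => if 1 < PySem.Set.len p.2 then PySem.Set.add f p.1 else f)
            PySem.Set.empty) (pvBid r) = true then "FLAG" else "") =
      (if pvBid r ≠ "" ∧
          pvScan (pvBid r) (results.map (fun r => (pvBid r, pvHandle r))) none = true
        then "FLAG" else "") := by
  have hco : ∀ (s : PySem.Set String) (x : String),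
      (PySem.Set.contains s x = true) ↔ x ∈ s := fun s x => PySem.Set.contains_iff s x
  by_cases hb : pvBid r = ""
  · have hnot : ¬ (PySem.Set.contains
        ((results.foldl pvStepA PySem.Dict.empty).items.foldl
          (fun f p => if 1 < PySem.Set.len p.2 then PySem.Set.add f p.1 else f)
          PySem.Set.empty) (pvBid r) = true) := by
      rw [hco, pvFlag_mem]
      rintro ⟨hk, -⟩
      have := pvFoldA_contains_empty results PySem.Dict.empty
      rw [PySem.Dict.contains_empty] at this
      rw [hb] at hk
      exact absurd ((PySem.Dict.contains_iff_mem_keys _ _).mpr hk) (by simp [this])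
    rw [if_neg hnot, if_neg (by simp [hb])]
  · have hiff : PySem.Set.contains
        ((results.foldl pvStepA PySem.Dict.empty).items.foldl
          (fun f p => if 1 < PySem.Set.len p.2 then PySem.Set.add f p.1 else f)
          PySem.Set.empty) (pvBid r) = true ↔
        (pvBid r ≠ "" ∧
          pvScan (pvBid r) (results.map (fun r => (pvBid r, pvHandle r))) none = true) := by
      rw [hco, pvFlag_mem]
      have hgd : (results.foldl pvStepA PySem.Dict.empty).getD (pvBid r) [] =
          PySem.Set.ofList (pvHs (pvBid r) (results.map (fun r => (pvBid r, pvHandle r)))) := by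
        rw [pvFoldA_getD results PySem.Dict.empty (pvBid r) hb, PySem.Dict.getD_empty,
          PySem.Set.ofList_eq_foldl]
      rw [hgd, pvOfList_one_lt, pvScan_none]
      constructor
      · rintro ⟨-, h2⟩
        exact ⟨hb, h2⟩
      · rintro ⟨-, h2⟩
        refine ⟨?_, h2⟩
        -- a recorded handle exists, so the key is present: getD ≠ []
        rw [← PySem.Dict.contains_iff_mem_keys, PySem.Dict.contains_eq_isSome_get?]
        cases hg : (results.foldl pvStepA PySem.Dict.empty).get? (pvBid r) with
        | some v => rfl
        | none =>
          exfalso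
          have hnil : (results.foldl pvStepA PySem.Dict.empty).getD (pvBid r) [] = [] :=
            PySem.Dict.getD_of_get?_eq_none _ [] hg
          rw [hgd] at hnil
          cases hl : pvHs (pvBid r) (results.map (fun r => (pvBid r, pvHandle r))) with
          | nil => rw [hl] at h2; exact h2
          | cons h t =>
            rw [hl, PySem.Set.ofList_cons] at hnil
            exact List.cons_ne_nil _ _ hnil
    exact if_congr hiff rfl rfl

-- ===== VERDICT (by name: the statement is the Claim_ definition above) =====
theorem add_review_flags_spec : Claim_equal_add_review_flags := by
  intro results _
  unfold Spec_add_review_flags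
  simp only [add_review_flags, add_review_flags_alt]
  rw [pvZip_map_self, List.map_map]
  apply List.map_congr_left
  intro r _
  simp only [Function.comp]
  congr 1
  exact pvCond_agree results r
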